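-- pv_equiv track=rewrite | github.com/antonionetoo/Evaluate-Checkpoints | phrasecorrector.py | _remove_last_concept_before_parentese
-- ===== SOURCE A (Python) =====
-- def _remove_last_concept_before_parentese(tokens):
--     close = [i for i, v in enumerate(tokens) if v == ')']
--     changes = False
--     for c in close:
--         if tokens[(c - 1)].startswith(':'):
--             changes = True
--             tokens.pop(c - 1)
--             close = [i for i, v in enumerate(tokens) if v == ')']
--
--     return (changes, tokens)
-- ===== SOURCE B (Python) =====
-- def _remove_last_concept_before_parentese(tokens):
--     j = next((i for i in range(1, len(tokens))
--               if tokens[i] == ')' and tokens[i - 1].startswith(':')), None)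
--     if j is None:
--         return (False, tokens)
--     del tokens[j - 1]
--     return (True, tokens)
-- ===== Notes on version B (the rewrite author's own statement) =====
-- stated objective: simpler
-- what changed: B replaces A's build-the-close-index-list / pop / rebuild loop by one direct scan for the first ')' whose predecessor starts with ':' and a single deletion (A's for-loop iterates the ORIGINAL close list, so it can fire at most once besides its c=0 wraparound, which B drops as a bug).
-- intended difference: When tokens[0] == ')' and the last token starts with ':', A's tokens[c-1] with c=0 wraps to the LAST element and A pops it (returning changes=True), although that token precedes no ')'; B leaves it in place and only removes a ':'-token directly before a ')', which is the function's stated purpose. — e.g. on _remove_last_concept_before_parentese([")", ":a"]): A returns (true, [")"]), B returns (false, [")", ":a"])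
import Mathlib
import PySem

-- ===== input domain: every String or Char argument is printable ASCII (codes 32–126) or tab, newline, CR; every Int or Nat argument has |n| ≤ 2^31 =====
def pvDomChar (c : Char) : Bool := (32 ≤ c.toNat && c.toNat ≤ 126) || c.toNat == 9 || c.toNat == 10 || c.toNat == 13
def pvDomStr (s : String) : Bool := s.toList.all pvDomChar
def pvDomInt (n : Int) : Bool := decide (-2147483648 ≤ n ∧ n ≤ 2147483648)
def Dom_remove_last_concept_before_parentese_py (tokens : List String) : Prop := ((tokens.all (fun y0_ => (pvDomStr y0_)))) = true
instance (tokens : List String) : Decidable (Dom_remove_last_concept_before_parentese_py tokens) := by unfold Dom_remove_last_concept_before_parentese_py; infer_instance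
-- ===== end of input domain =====

-- B removes the first ':'-token standing directly before a ')' in one direct scan instead of A's
-- close-index-list / pop / rebuild loop; equivalence is about the RETURN value (both Pythons also
-- mutate `tokens` in place). On D_ below A's negative-index wraparound differs and B is intended.

-- ===== PORT A =====
def pvCloseOf (tokens : List String) : List Int :=
  (PySem.List.enumerate tokens).filterMap (fun iv => if iv.2 == ")" then some iv.1 else none)

def pvStepA (st : Bool × List String × List Int) (c : Int) : Bool × List String × List Int :=
  match PySem.List.pyGet? st.2.1 (c - 1) with
  | some v =>
    if PySem.Str.startswith v ":" then
      match PySem.List.pop? st.2.1 (c - 1) with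
      | some r => (true, r.2, pvCloseOf r.2)
      | none => st          -- unreachable: pyGet? just succeeded at the same index
    else st
  | none => st              -- IndexError (never reached by A, proved below)

def remove_last_concept_before_parentese_py (tokens : List String) : Bool × List String :=
  let close := pvCloseOf tokens
  let r := close.foldl pvStepA (false, tokens, close)
  (r.1, r.2.1)

-- ===== PORT B =====
def pvFindPair : List String → Option Nat
  | a :: b :: rest =>
      if b == ")" && PySem.Str.startswith a ":" then some 1
      else (pvFindPair (b :: rest)).map (· + 1)
  | _ => none

def remove_last_concept_before_parentese_py_alt (tokens : List String) : Bool × List String :=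
  match pvFindPair tokens with
  | none => (false, tokens)
  | some j => (true, tokens.eraseIdx (j - 1))

-- ===== PRECONDITION & SPEC =====
-- When tokens[0] == ')' and the last token starts with ':', A's tokens[c-1] with c = 0 wraps to
-- the LAST element and A pops it (changes=True) although it precedes no ')'; B leaves it and only
-- removes a ':'-token directly before a ')', the function's stated purpose.
def D_remove_last_concept_before_parentese_py (tokens : List String) : Prop :=
  tokens.head? = some ")" ∧ PySem.Str.startswith (tokens.getLast?.getD "") ":" = true
instance (tokens : List String) : Decidable (D_remove_last_concept_before_parentese_py tokens) := by
  unfold D_remove_last_concept_before_parentese_py; infer_instance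

def Spec_remove_last_concept_before_parentese_py (tokens : List String) (out : Bool × List String) : Prop :=
  ¬ D_remove_last_concept_before_parentese_py tokens → out = remove_last_concept_before_parentese_py_alt tokens
instance (tokens : List String) (out : Bool × List String) : Decidable (Spec_remove_last_concept_before_parentese_py tokens out) := by
  unfold Spec_remove_last_concept_before_parentese_py; infer_instance

def pvDiffWitness_remove_last_concept_before_parentese_py : List String := [")", ":a"]
def pvDiffWitnessOut_remove_last_concept_before_parentese_py : (Bool × List String) × (Bool × List String) :=
  ((true, [")"]), (false, [")", ":a"]))

-- ===== CLAIM (what is proved, stated in full; the proofs are below) =====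
def Claim_unchanged_remove_last_concept_before_parentese_py : Prop := ∀ (tokens : List String), Dom_remove_last_concept_before_parentese_py tokens → Spec_remove_last_concept_before_parentese_py tokens (remove_last_concept_before_parentese_py tokens)
def Claim_changed_remove_last_concept_before_parentese_py : Prop := Dom_remove_last_concept_before_parentese_py (pvDiffWitness_remove_last_concept_before_parentese_py) ∧ D_remove_last_concept_before_parentese_py (pvDiffWitness_remove_last_concept_before_parentese_py) ∧ remove_last_concept_before_parentese_py (pvDiffWitness_remove_last_concept_before_parentese_py) = pvDiffWitnessOut_remove_last_concept_before_parentese_py.1 ∧ remove_last_concept_before_parentese_py_alt (pvDiffWitness_remove_last_concept_before_parentese_py) = pvDiffWitnessOut_remove_last_concept_before_parentese_py.2 ∧ pvDiffWitnessOut_remove_last_concept_before_parentese_py.1 ≠ pvDiffWitnessOut_remove_last_concept_before_parentese_py.2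
def Claim_exact_remove_last_concept_before_parentese_py : Prop := ∀ (tokens : List String), Dom_remove_last_concept_before_parentese_py tokens → D_remove_last_concept_before_parentese_py tokens → remove_last_concept_before_parentese_py tokens ≠ remove_last_concept_before_parentese_py_alt tokens

-- ===== LEMMAS AND PROOFS =====

-- the firing condition of A's loop body on the current token list at close-index c
def pvFire (ts : List String) (c : Int) : Bool :=
  match PySem.List.pyGet? ts (c - 1) with
  | some v => PySem.Str.startswith v ":"
  | none => false

theorem pvStepA_no_fire {ts : List String} {ch : Bool} {cl : List Int} {c : Int}
    (h : pvFire ts c = false) : pvStepA (ch, ts, cl) c = (ch, ts, cl) := by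
  unfold pvStepA pvFire at *
  cases hg : PySem.List.pyGet? ts (c - 1) with
  | none => simp
  | some v =>
      rw [hg] at h
      simp at h
      simp
      intro hs
      simp [hs] at h

theorem pvFold_no_fire {L : List Int} {ts : List String} {ch : Bool} {cl : List Int}
    (h : ∀ c ∈ L, pvFire ts c = false) :
    L.foldl pvStepA (ch, ts, cl) = (ch, ts, cl) := by
  induction L with
  | nil => rfl
  | cons c L ih =>
      simp only [List.foldl_cons, pvStepA_no_fire (h c (by simp))]
      exact ih (fun c' hc' => h c' (by simp [hc']))

-- membership spec of the close-index list built from a suffix starting at absolute index s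
theorem pvMem_closeAux {ts : List String} {s : Nat} {c : Int}
    (h : c ∈ (PySem.List.enumerate ts (s : Int)).filterMap (fun iv => if iv.2 == ")" then some iv.1 else none)) :
    ∃ k : Nat, c = (k : Int) ∧ s ≤ k ∧ k - s < ts.length ∧ ts[k - s]? = some ")" := by
  rw [List.mem_filterMap] at h
  obtain ⟨iv, hmem, hf⟩ := h
  rw [PySem.List.mem_enumerate_iff] at hmem
  obtain ⟨k, hk, rfl⟩ := hmem
  simp only [beq_iff_eq] at hf
  split at hf
  · next hv =>
      cases hf
      refine ⟨s + k, by push_cast; ring, by omega, by omega, ?_⟩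
      have hss : s + k - s = k := by omega
      rw [hss, List.getElem?_eq_getElem hk, hv]
  · cases hf

theorem pvMem_closeAux_intro {ts : List String} {s k : Nat}
    (hk : k - s < ts.length) (hks : s ≤ k) (hv : ts[k - s]? = some ")") :
    (k : Int) ∈ (PySem.List.enumerate ts (s : Int)).filterMap (fun iv => if iv.2 == ")" then some iv.1 else none) := by
  rw [List.mem_filterMap]
  refine ⟨((s : Int) + (k - s : Nat), ts[k - s]'hk), ?_, ?_⟩
  · rw [PySem.List.mem_enumerate_iff]
    exact ⟨k - s, hk, rfl⟩
  · have hv' : ts[k - s]'hk = ")" := by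
      rw [List.getElem?_eq_getElem hk] at hv; exact Option.some_injective _ hv
    simp only [hv', beq_self_eq_true, if_pos]
    congr 1
    omega

theorem pvPairwise_closeAux (ts : List String) (s : Int) :
    ((PySem.List.enumerate ts s).filterMap (fun iv => if iv.2 == ")" then some iv.1 else none)).Pairwise (· < ·) := by
  rw [List.pairwise_filterMap]
  refine (PySem.List.pairwise_lt_enumerate _ _).imp ?_
  intro a b hab x hx y hy
  split at hx
  · cases hx
    split at hy
    · cases hy; exact hab
    · cases hy
  · cases hx

-- A's loop on a list of genuine (>= 1, in-range, ')') close indices: only the first firing index pops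
theorem pvPhase {L : List Int} {ts : List String} {ch : Bool} {cl : List Int}
    (hmem : ∀ c ∈ L, ∃ k : Nat, c = (k : Int) ∧ 1 ≤ k ∧ k < ts.length ∧ ts[k]? = some ")")
    (hsort : L.Pairwise (· < ·)) :
    L.foldl pvStepA (ch, ts, cl) =
      match L.find? (pvFire ts) with
      | none => (ch, ts, cl)
      | some c => (true, ts.eraseIdx (c.toNat - 1), pvCloseOf (ts.eraseIdx (c.toNat - 1))) := by
  induction L generalizing cl with
  | nil => rfl
  | cons c L ih =>
    obtain ⟨k, rfl, hk1, hklen, hkval⟩ := hmem _ (List.mem_cons_self ..)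
    by_cases hf : pvFire ts (k : Int) = true
    · have hcast : (k : Int) - 1 = ((k - 1 : Nat) : Int) := by omega
      have hi1 : k - 1 < ts.length := by omega
      have hget : PySem.List.pyGet? ts ((k : Int) - 1) = some (ts[k-1]'hi1) := by
        rw [hcast, PySem.List.pyGet?_natCast, List.getElem?_eq_getElem hi1]
      have hsw : PySem.Str.startswith (ts[k-1]'hi1) ":" = true := by
        unfold pvFire at hf; rw [hget] at hf; exact hf
      have hpop : PySem.List.pop? ts ((k : Int) - 1) = some (ts[k-1]'hi1, ts.eraseIdx (k-1)) := by
        rw [hcast, PySem.List.pop?_natCast ts (k-1) hi1]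
      have hstep : pvStepA (ch, ts, cl) (k : Int) = (true, ts.eraseIdx (k-1), pvCloseOf (ts.eraseIdx (k-1))) := by
        unfold pvStepA
        rw [hget]
        simp only [hsw, if_pos]
        rw [hpop]
      rw [List.foldl_cons, hstep]
      have hrest : ∀ c' ∈ L, pvFire (ts.eraseIdx (k-1)) c' = false := by
        intro c' hc'
        obtain ⟨k', rfl, hk'1, hk'len, hk'val⟩ := hmem c' (List.mem_cons_of_mem _ hc')
        have hlt : (k : Int) < (k' : Int) := List.rel_of_pairwise_cons hsort hc'
        have hkk : k < k' := by exact_mod_cast hlt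
        unfold pvFire
        have hc2 : (k' : Int) - 1 = ((k' - 1 : Nat) : Int) := by omega
        have hget' : PySem.List.pyGet? (ts.eraseIdx (k-1)) ((k' : Int) - 1) = ts[k']? := by
          rw [hc2, PySem.List.pyGet?_natCast, List.getElem?_eraseIdx]
          rw [if_neg (by omega)]
          congr 1
          omega
        rw [hget', hk'val]
        decide
      rw [pvFold_no_fire hrest]
      rw [List.find?_cons_of_pos hf]
      simp
    · have hf' : pvFire ts (k : Int) = false := by simpa using hf
      rw [List.foldl_cons, pvStepA_no_fire hf']
      rw [ih (fun c hc => hmem c (List.mem_cons_of_mem _ hc)) hsort.of_cons]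
      rw [List.find?_cons_of_neg (by simp [hf'])]

-- correspondence between A's close-index search and B's pair scan
theorem pvFindCorr (ts0 : List String) :
    ∀ (rest : List String) (p : String) (m : Nat), 1 ≤ m → ts0.drop (m - 1) = p :: rest →
    ((PySem.List.enumerate rest (m : Int)).filterMap (fun iv => if iv.2 == ")" then some iv.1 else none)).find? (pvFire ts0)
      = (pvFindPair (p :: rest)).map (fun j => ((m - 1 + j : Nat) : Int)) := by
  intro rest
  induction rest with
  | nil =>
      intro p m hm hd
      simp [PySem.List.enumerate_nil, pvFindPair]
  | cons b rest2 ih =>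
      intro p m hm hd
      have hdm : ts0.drop m = b :: rest2 := by
        have h1 : ts0.drop m = (ts0.drop (m-1)).drop 1 := by
          rw [List.drop_drop]; congr 1; omega
        rw [h1, hd]
        rfl
      have hp : PySem.List.pyGet? ts0 ((m : Int) - 1) = some p := by
        have h1 : (m : Int) - 1 = ((m - 1 : Nat) : Int) := by omega
        have h2 : ts0[m - 1 + 0]? = some p := by rw [← List.getElem?_drop, hd]; rfl
        rw [h1, PySem.List.pyGet?_natCast]
        exact h2
      have hfire : pvFire ts0 (m : Int) = PySem.Str.startswith p ":" := by
        unfold pvFire; rw [hp]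
      have hcast1 : (m : Int) + 1 = ((m + 1 : Nat) : Int) := by omega
      rw [PySem.List.enumerate_cons, List.filterMap_cons]
      by_cases hb : b = ")"
      · rw [if_pos (by simp [hb])]
        by_cases hs : PySem.Str.startswith p ":" = true
        · have hsC : PySem.Chars.startswith p.toList [':'] = true := by simpa using hs
          rw [List.find?_cons_of_pos (by rw [hfire]; exact hs)]
          have hfp : pvFindPair (p :: b :: rest2) = some 1 := by
            simp only [pvFindPair]
            rw [if_pos (by simp [hb, hsC])]
          rw [hfp]
          simp only [Option.map_some]
          congr 1
          omega
        · have hs' : PySem.Str.startswith p ":" = false := by simpa using hs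
          have hsC : PySem.Chars.startswith p.toList [':'] = false := by simpa using hs'
          rw [List.find?_cons_of_neg (by rw [hfire, hs']; simp)]
          have hfp : pvFindPair (p :: b :: rest2) = (pvFindPair (b :: rest2)).map (· + 1) := by
            simp only [pvFindPair]
            rw [if_neg (by simp [hsC])]
          rw [hfp, hcast1, ih b (m+1) (by omega) (by simpa using hdm)]
          cases pvFindPair (b :: rest2) with
          | none => rfl
          | some j =>
              simp only [Option.map_some]
              congr 1
              omega
      · rw [if_neg (by simp [hb])]
        have hfp : pvFindPair (p :: b :: rest2) = (pvFindPair (b :: rest2)).map (· + 1) := by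
          simp only [pvFindPair]
          rw [if_neg (by simp [hb])]
        rw [hfp, hcast1, ih b (m+1) (by omega) (by simpa using hdm)]
        cases pvFindPair (b :: rest2) with
        | none => rfl
        | some j =>
            simp only [Option.map_some]
            congr 1
            omega

-- shared main characterization: whenever A's wraparound check at c = 0 does not fire, A = B
theorem pvFindCorr1 (a : String) (rest : List String) :
    ((PySem.List.enumerate rest (1 : Int)).filterMap (fun iv => if iv.2 == ")" then some iv.1 else none)).find? (pvFire (a :: rest))
      = (pvFindPair (a :: rest)).map (fun j : Nat => (j : Int)) := by
  have h := pvFindCorr (a :: rest) rest a 1 (le_refl 1) (by simp)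
  have e1 : ((1 : Nat) : Int) = (1 : Int) := by norm_num
  rw [e1] at h
  have e2 : (fun j : Nat => ((1 - 1 + j : Nat) : Int)) = (fun j : Nat => (j : Int)) := by
    funext j
    norm_num
  rw [e2] at h
  exact h

theorem pvMain (a : String) (rest : List String)
    (h0 : a = ")" → pvFire (a :: rest) 0 = false) :
    remove_last_concept_before_parentese_py (a :: rest) = remove_last_concept_before_parentese_py_alt (a :: rest) := by
  have hmemT : ∀ c ∈ (PySem.List.enumerate rest (1 : Int)).filterMap (fun iv => if iv.2 == ")" then some iv.1 else none),
      ∃ k : Nat, c = (k : Int) ∧ 1 ≤ k ∧ k < (a :: rest).length ∧ (a :: rest)[k]? = some ")" := by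
    intro c hc
    obtain ⟨k, rfl, hk1, hklen, hkval⟩ := pvMem_closeAux (s := 1) hc
    refine ⟨k, rfl, hk1, by simp; omega, ?_⟩
    obtain ⟨k', rfl⟩ : ∃ k', k = k' + 1 := ⟨k - 1, by omega⟩
    simpa using hkval
  have hsortT := pvPairwise_closeAux rest (1 : Int)
  by_cases hb : a = ")"
  · subst hb
    have hclose : pvCloseOf (")" :: rest) = 0 :: (PySem.List.enumerate rest (1 : Int)).filterMap (fun iv => if iv.2 == ")" then some iv.1 else none) := by
      simp [pvCloseOf, PySem.List.enumerate_cons]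
    simp only [remove_last_concept_before_parentese_py, remove_last_concept_before_parentese_py_alt, hclose]
    rw [List.foldl_cons, pvStepA_no_fire (h0 rfl)]
    rw [pvPhase hmemT hsortT, pvFindCorr1 ")" rest]
    cases hfp : pvFindPair (")" :: rest) with
    | none => rfl
    | some j => simp
  · have hclose : pvCloseOf (a :: rest) = (PySem.List.enumerate rest (1 : Int)).filterMap (fun iv => if iv.2 == ")" then some iv.1 else none) := by
      simp [pvCloseOf, PySem.List.enumerate_cons, hb]
    simp only [remove_last_concept_before_parentese_py, remove_last_concept_before_parentese_py_alt, hclose]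
    rw [pvPhase hmemT hsortT, pvFindCorr1 a rest]
    cases hfp : pvFindPair (a :: rest) with
    | none => rfl
    | some j => simp

-- forward spec of B's scan
theorem pvFindPair_spec : ∀ {ts : List String} {j : Nat}, pvFindPair ts = some j →
    1 ≤ j ∧ j < ts.length ∧ ts[j]? = some ")" ∧
      ∃ v, ts[j-1]? = some v ∧ PySem.Str.startswith v ":" = true := by
  intro ts
  induction ts with
  | nil => intro j h; cases h
  | cons a tl ih =>
      intro j h
      cases tl with
      | nil => cases h
      | cons b rest2 =>
          unfold pvFindPair at h
          split at h
          · next hcond =>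
              cases h
              simp only [Bool.and_eq_true, beq_iff_eq] at hcond
              exact ⟨le_refl 1, by simp, by simp [hcond.1], ⟨a, rfl, hcond.2⟩⟩
          · simp only [Option.map_eq_some_iff] at h
            obtain ⟨j', hj', rfl⟩ := h
            obtain ⟨h1, h2, h3, v, h4, h5⟩ := ih hj'
            refine ⟨by omega, by simpa using (by omega : j' + 1 < (b :: rest2).length + 1), by simpa using h3, ⟨v, ?_, h5⟩⟩
            have : j' + 1 - 1 = j' := by omega
            rw [this]
            obtain ⟨j'', rfl⟩ : ∃ j'', j' = j'' + 1 := ⟨j' - 1, by omega⟩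
            simpa using h4

-- ===== VERDICT (by name: the statement is the Claim_ definition above) =====
theorem remove_last_concept_before_parentese_py_spec : Claim_unchanged_remove_last_concept_before_parentese_py := by
  unfold Claim_unchanged_remove_last_concept_before_parentese_py Spec_remove_last_concept_before_parentese_py
  intro ts _ hD
  cases ts with
  | nil => rfl
  | cons a rest =>
      refine pvMain a rest (fun hb => ?_)
      unfold D_remove_last_concept_before_parentese_py at hD
      have hlast : PySem.Str.startswith ((a :: rest).getLast?.getD "") ":" = false := by
        by_contra hc
        exact hD ⟨by simp [hb], by simpa using hc⟩
      unfold pvFire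
      have hne : (a :: rest) ≠ [] := by simp
      rw [show (0 : Int) - 1 = -1 by ring, PySem.List.pyGet?_neg_one]
      obtain ⟨x, hx⟩ := Option.ne_none_iff_exists'.mp (by simp [List.getLast?_eq_none_iff] : (a :: rest).getLast? ≠ none)
      rw [hx]
      rw [hx] at hlast
      simpa using hlast

theorem remove_last_concept_before_parentese_py_changed : Claim_changed_remove_last_concept_before_parentese_py := by
  unfold Claim_changed_remove_last_concept_before_parentese_py; decide

theorem remove_last_concept_before_parentese_py_tight : Claim_exact_remove_last_concept_before_parentese_py := by
  unfold Claim_exact_remove_last_concept_before_parentese_py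
  intro ts _ hD
  obtain ⟨hhead, hlast⟩ := hD
  cases ts with
  | nil => cases hhead
  | cons a rest =>
    have ha : a = ")" := by simpa using hhead
    subst ha
    cases rest with
    | nil => exact absurd hlast (by decide)
    | cons b rest' =>
      -- abbreviations
      set rest := b :: rest' with hrest
      have hne : rest ≠ [] := by simp [hrest]
      have hn1 : 1 ≤ rest.length := by simp [hrest]
      -- the last element of the list starts with ':'
      have hgl : (")" :: rest).getLast? = rest[rest.length - 1]? := by
        rw [List.getLast?_eq_getElem?]
        simp only [List.length_cons, Nat.add_sub_cancel]
        obtain ⟨k', hk'⟩ : ∃ k', rest.length = k' + 1 := ⟨rest.length - 1, by omega⟩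
        rw [hk']
        simp
      have hlt : rest.length - 1 < rest.length := by omega
      obtain ⟨w, hw⟩ : ∃ w, rest[rest.length - 1]? = some w :=
        ⟨rest[rest.length - 1]'hlt, List.getElem?_eq_getElem hlt⟩
      have hwlast : PySem.Str.startswith w ":" = true := by
        rw [hgl, hw] at hlast
        simpa using hlast
      -- any close index with a ')' value is strictly before the last position
      have hNotLast : ∀ k : Nat, rest[k - 1]? = some ")" → k - 1 < rest.length → 1 ≤ k → k < rest.length := by
        intro k hkv hkr hk1
        by_contra hge
        have hkeq : k = rest.length := by omega
        rw [hkeq] at hkv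
        rw [hkv] at hw
        cases hw
        exact absurd hwlast (by decide)
      -- step 0 of A's loop fires through the negative-index wraparound and pops the LAST token
      have hglts : (")" :: rest).getLast? = some w := by rw [hgl, hw]
      have hfire0 : pvFire (")" :: rest) 0 = true := by
        unfold pvFire
        rw [show (0 : Int) - 1 = -1 by ring, PySem.List.pyGet?_neg_one, hglts]
        exact hwlast
      have hpop0 : PySem.List.pop? (")" :: rest) ((0 : Int) - 1) = some ((")" :: rest).getLast (by simp), (")" :: rest).dropLast) := by
        rw [show (0 : Int) - 1 = -1 by ring]
        conv_lhs => rw [← List.dropLast_append_getLast (show (")" :: rest) ≠ [] by simp)]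
        exact PySem.List.pop?_last _ _
      have hstep0 : ∀ cl, pvStepA (false, ")" :: rest, cl) 0 =
          (true, (")" :: rest).dropLast, pvCloseOf ((")" :: rest).dropLast)) := by
        intro cl
        unfold pvStepA
        have hget0 : PySem.List.pyGet? (")" :: rest) ((0 : Int) - 1) = some w := by
          rw [show (0 : Int) - 1 = -1 by ring, PySem.List.pyGet?_neg_one, hglts]
        rw [hget0]
        simp only [hwlast, if_pos]
        rw [hpop0]
      -- the truncated list seen by the remaining iterations
      have hts1get : ∀ k : Nat, k < rest.length → ((")" :: rest).dropLast)[k]? = (")" :: rest)[k]? := by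
        intro k hk
        rw [List.getElem?_dropLast, if_pos (by simp; omega)]
      have hmem1 : ∀ c ∈ (PySem.List.enumerate rest (1 : Int)).filterMap (fun iv : Int × String => if iv.2 == ")" then some iv.1 else none),
          ∃ k : Nat, c = (k : Int) ∧ 1 ≤ k ∧ k < ((")" :: rest).dropLast).length ∧ ((")" :: rest).dropLast)[k]? = some ")" := by
        intro c hc
        obtain ⟨k, rfl, hk1, hklen, hkval⟩ := pvMem_closeAux (s := 1) hc
        have hklt : k < rest.length := hNotLast k hkval hklen hk1
        have hlen1 : ((")" :: rest).dropLast).length = rest.length := by simp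
        refine ⟨k, rfl, hk1, by omega, ?_⟩
        rw [hts1get k hklt]
        obtain ⟨k', rfl⟩ : ∃ k', k = k' + 1 := ⟨k - 1, by omega⟩
        simpa using hkval
      have hclose : pvCloseOf (")" :: rest) = 0 :: (PySem.List.enumerate rest (1 : Int)).filterMap (fun iv : Int × String => if iv.2 == ")" then some iv.1 else none) := by
        simp [pvCloseOf, PySem.List.enumerate_cons]
      -- A's value on this input
      have hA : remove_last_concept_before_parentese_py (")" :: rest) =
          ((match (((PySem.List.enumerate rest (1 : Int)).filterMap (fun iv : Int × String => if iv.2 == ")" then some iv.1 else none)).find? (pvFire ((")" :: rest).dropLast))) with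
            | none => (true, (")" :: rest).dropLast, pvCloseOf ((")" :: rest).dropLast))
            | some c => (true, ((")" :: rest).dropLast).eraseIdx (c.toNat - 1), pvCloseOf (((")" :: rest).dropLast).eraseIdx (c.toNat - 1)))).1,
           (match (((PySem.List.enumerate rest (1 : Int)).filterMap (fun iv : Int × String => if iv.2 == ")" then some iv.1 else none)).find? (pvFire ((")" :: rest).dropLast))) with
            | none => (true, (")" :: rest).dropLast, pvCloseOf ((")" :: rest).dropLast))
            | some c => (true, ((")" :: rest).dropLast).eraseIdx (c.toNat - 1), pvCloseOf (((")" :: rest).dropLast).eraseIdx (c.toNat - 1)))).2.1) := by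
        simp only [remove_last_concept_before_parentese_py, hclose]
        rw [List.foldl_cons, hstep0]
        rw [pvPhase hmem1 (pvPairwise_closeAux rest (1 : Int))]
      -- compare with B
      unfold remove_last_concept_before_parentese_py_alt
      cases hfp : pvFindPair (")" :: rest) with
      | none =>
          -- B reports no change, A reports a change
          rw [hA]
          cases hfind : (((PySem.List.enumerate rest (1 : Int)).filterMap (fun iv : Int × String => if iv.2 == ")" then some iv.1 else none)).find? (pvFire ((")" :: rest).dropLast))) with
          | none => intro heq; cases heq
          | some c => intro heq; cases heq
      | some j =>
          obtain ⟨hj1, hjlen, hjval, v, hjv, hjsw⟩ := pvFindPair_spec hfp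
          have hjval' : rest[j - 1]? = some ")" := by
            obtain ⟨j', rfl⟩ : ∃ j', j = j' + 1 := ⟨j - 1, by omega⟩
            simpa using hjval
          have hjlt : j < rest.length := hNotLast j hjval' (by simp at hjlen; omega) hj1
          -- A's inner search succeeds as well (at j if not earlier)
          have hmemJ : (j : Int) ∈ (PySem.List.enumerate rest (1 : Int)).filterMap (fun iv : Int × String => if iv.2 == ")" then some iv.1 else none) := by
            exact pvMem_closeAux_intro (s := 1) (by omega) (by omega) hjval'
          have hfireJ : pvFire ((")" :: rest).dropLast) (j : Int) = true := by
            unfold pvFire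
            have hc : (j : Int) - 1 = ((j - 1 : Nat) : Int) := by omega
            rw [hc, PySem.List.pyGet?_natCast, hts1get (j - 1) (by omega), hjv]
            exact hjsw
          obtain ⟨c0, hc0⟩ : ∃ c0, (((PySem.List.enumerate rest (1 : Int)).filterMap (fun iv : Int × String => if iv.2 == ")" then some iv.1 else none)).find? (pvFire ((")" :: rest).dropLast))) = some c0 :=
            Option.isSome_iff_exists.mp (List.find?_isSome.mpr ⟨(j : Int), hmemJ, hfireJ⟩)
          obtain ⟨k0, rfl, hk01, hk0len, hk0val⟩ := hmem1 c0 (List.mem_of_find?_eq_some hc0)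
          rw [hA, hc0]
          intro heq
          have hlen := congrArg (fun p : Bool × List String => p.2.length) heq
          simp only [List.length_eraseIdx] at hlen
          have hl1 : ((")" :: rest).dropLast).length = rest.length := by simp
          rw [if_pos (by omega), if_pos (by simp; omega)] at hlen
          simp at hlen
          omega
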